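-- pv_equiv track=rewrite | github.com/weaveeducation/edx-platform | common/djangoapps/credo_modules/events_processor/utils.py | update_course_and_student_properties
-- ===== SOURCE A (Python) =====
-- def pull_value_from_student_properties(key, properties):
--     key_updated = key.strip().lower()
--     new_value = None
--     new_properties = properties.copy()
--
--     tmp_properties = {}
--     for k in new_properties:
--         tmp_properties[k.strip().lower()] = k
--     for tk, tv in tmp_properties.items():
--         if tk == key_updated:
--             new_value = new_properties[tv].replace('+', '-') \
--                     .replace("\n", "").replace("\t", "").replace("\r", "").replace("|", " ")
--             del new_properties[tv]
--     return new_value, new_properties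
--
-- def update_course_and_student_properties(course, student_properties):
--     overload_items = {
--         'course': {
--             'value': course,
--             'props': ['course', 'courses', 'course_title', 'course title',
--                       'course_name', 'course name', 'coursename', 'othercourse']
--         },
--     }
--     for k in overload_items:
--         for prop in overload_items[k]['props']:
--             new_value, new_properties = pull_value_from_student_properties(prop, student_properties)
--             if new_value:
--                 overload_items[k]['value'], student_properties = new_value, new_properties
--
--     return overload_items['course']['value'], student_properties
-- ===== SOURCE B (Python) =====
-- def update_course_and_student_properties(course, student_properties):
--     result = student_properties.copy()
--     # one normalized-key index built once: normalized key -> original key (last wins)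
--     norm = {k.strip().lower(): k for k in result}
--     value = course
--     for prop in ('course', 'courses', 'course_title', 'course title',
--                  'course_name', 'course name', 'coursename', 'othercourse'):
--         orig = norm.get(prop)
--         if orig is None:
--             continue
--         new_value = result[orig].replace('+', '-') \
--             .replace("\n", "").replace("\t", "").replace("\r", "").replace("|", " ")
--         if new_value:
--             value = new_value
--             del result[orig]
--     return value, result
-- ===== Notes on version B (the rewrite author's own statement) =====
-- stated objective: faster
-- what changed: B inlines the helper and builds the normalized-key index (k.strip().lower() -> k, last wins) over the dict once, then answers each of the 8 property names by one direct lookup, instead of A's per-property rebuild of the index and full rescan of the dict.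
import Mathlib
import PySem

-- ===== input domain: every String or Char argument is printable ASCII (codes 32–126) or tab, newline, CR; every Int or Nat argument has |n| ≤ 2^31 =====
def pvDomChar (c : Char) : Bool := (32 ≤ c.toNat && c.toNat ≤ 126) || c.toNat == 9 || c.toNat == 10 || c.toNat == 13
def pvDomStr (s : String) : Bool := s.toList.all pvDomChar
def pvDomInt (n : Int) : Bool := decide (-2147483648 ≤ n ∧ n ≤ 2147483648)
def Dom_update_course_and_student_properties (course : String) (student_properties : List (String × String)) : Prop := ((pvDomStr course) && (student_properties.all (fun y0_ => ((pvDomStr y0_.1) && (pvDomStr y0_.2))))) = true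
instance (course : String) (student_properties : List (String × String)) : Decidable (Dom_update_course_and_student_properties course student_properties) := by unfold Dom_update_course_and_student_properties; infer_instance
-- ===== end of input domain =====

-- B builds the normalized-key index over the dict ONCE and looks the 8 property names up in it,
-- instead of A's rebuild-the-index-and-rescan for every property name; same return value.

-- ===== PORT A =====
-- the .replace('+','-').replace('\n','').replace('\t','').replace('\r','').replace('|',' ') chain
def pvClean (s : String) : String :=
  PySem.Str.replace (PySem.Str.replace (PySem.Str.replace (PySem.Str.replace
    (PySem.Str.replace s "+" "-") "\n" "") "\t" "") "\r" "") "|" " "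

-- k.strip().lower()
def pvNorm (k : String) : String := PySem.Str.lower (PySem.Str.strip k)

def pull_value_from_student_properties (key : String) (properties : PySem.Dict String String) :
    Option String × PySem.Dict String String :=
  let key_updated := pvNorm key
  let tmp_properties := properties.keys.foldl
    (fun d k => d.insert (pvNorm k) k) PySem.Dict.empty
  tmp_properties.items.foldl
    (fun st p =>
      if p.1 == key_updated then
        -- new_properties[tv]: tv is always a present key, so the getD "" default is never used
        (some (pvClean ((st.2.get? p.2).getD "")), st.2.erase p.2)
      else st)
    ((none : Option String), properties)

def pvProps : List String :=
  ["course", "courses", "course_title", "course title",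
   "course_name", "course name", "coursename", "othercourse"]

def update_course_and_student_properties (course : String) (student_properties : List (String × String)) : String × (List (String × String)) :=
  let st := pvProps.foldl
    (fun (st : String × PySem.Dict String String) prop =>
      let r := pull_value_from_student_properties prop st.2
      match r.1 with
      | some nv => if nv ≠ "" then (nv, r.2) else st
      | none => st)
    (course, PySem.Dict.ofList student_properties)
  (st.1, st.2.items)

-- ===== PORT B =====
def update_course_and_student_properties_alt (course : String) (student_properties : List (String × String)) : String × (List (String × String)) :=
  let result := PySem.Dict.ofList student_properties
  let norm := result.keys.foldl
    (fun d k => d.insert (pvNorm k) k) PySem.Dict.empty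
  let st := pvProps.foldl
    (fun (st : String × PySem.Dict String String) prop =>
      match norm.get? prop with
      | none => st
      | some orig =>
        let nv := pvClean ((st.2.get? orig).getD "")
        if nv ≠ "" then (nv, st.2.erase orig) else st)
    (course, result)
  (st.1, st.2.items)

-- ===== PRECONDITION & SPEC =====
def Spec_update_course_and_student_properties (course : String) (student_properties : List (String × String)) (out : String × (List (String × String))) : Prop := out = update_course_and_student_properties_alt course student_properties
instance (course : String) (student_properties : List (String × String)) (out : String × (List (String × String))) : Decidable (Spec_update_course_and_student_properties course student_properties out) := by unfold Spec_update_course_and_student_properties; infer_instance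

-- ===== CLAIM (what is proved, stated in full; the proofs are below) =====
def Claim_equal_update_course_and_student_properties : Prop := ∀ (course : String) (student_properties : List (String × String)), Dom_update_course_and_student_properties course student_properties → Spec_update_course_and_student_properties course student_properties (update_course_and_student_properties course student_properties)

-- ===== LEMMAS AND PROOFS =====

-- a fold that only acts on the pair whose key matches x: no match leaves the state alone
lemma pv_foldl_if_none {S : Type} (l : List (String × String)) (x : String)
    (h : ∀ q ∈ l, q.1 ≠ x)
    (f : S → String × String → S) (init : S) :
    l.foldl (fun st p => if p.1 == x then f st p else st) init = init := by
  induction l generalizing init with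
  | nil => rfl
  | cons p l ih =>
    have hp : (p.1 == x) = false := beq_eq_false_iff_ne.mpr (h p (List.mem_cons_self ..))
    simp only [List.foldl_cons, hp, Bool.false_eq_true, if_false]
    exact ih (fun q hq => h q (List.mem_cons_of_mem _ hq)) init

-- with unique keys the fold acts exactly once, on the find?-match
lemma pv_foldl_if_find {S : Type} (l : List (String × String)) (x : String)
    (h : (l.map Prod.fst).Nodup)
    (f : S → String × String → S) (init : S) :
    l.foldl (fun st p => if p.1 == x then f st p else st) init =
      match l.find? (fun p => p.1 == x) with
      | none => init
      | some p => f init p := by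
  induction l generalizing init with
  | nil => rfl
  | cons p l ih =>
    simp only [List.map_cons, List.nodup_cons] at h
    cases hb : (p.1 == x) with
    | true =>
      have hpx : p.1 = x := beq_iff_eq.mp hb
      have hfind : List.find? (fun p => p.1 == x) (p :: l) = some p :=
        List.find?_cons_of_pos hb
      have hnone : ∀ q ∈ l, q.1 ≠ x := by
        intro q hq hqx
        exact h.1 (by rw [hpx, ← hqx]; exact List.mem_map_of_mem hq)
      simp only [List.foldl_cons, hfind, hb, if_true]
      exact pv_foldl_if_none l x hnone f (f init p)
    | false =>
      have hfind : List.find? (fun p => p.1 == x) (p :: l) = List.find? (fun p => p.1 == x) l :=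
        List.find?_cons_of_neg (by simp [hb])
      simp only [List.foldl_cons, hfind, hb, Bool.false_eq_true, if_false]
      exact ih h.2 init

-- the normalization table is the fold of inserts; its lookup is "last key whose normalization is p"
lemma pv_tab_get (L : List String) (t : PySem.Dict String String) (p : String) :
    (L.foldl (fun d k => d.insert (pvNorm k) k) t).get? p
      = ((L.filter (fun k => pvNorm k == p)).getLast?).or (t.get? p) := by
  induction L using List.reverseRecOn with
  | nil => simp
  | append_singleton L k ih =>
    rw [List.foldl_append, List.foldl_cons, List.foldl_nil, PySem.Dict.get?_insert]
    by_cases hk : pvNorm k = p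
    · simp [List.filter_append, hk]
    · have hkb : (pvNorm k == p) = false := beq_eq_false_iff_ne.mpr hk
      rw [if_neg (fun h => hk h.symm)]
      simp [List.filter_append, hkb, ih]

lemma pv_tab_get0 (L : List String) (p : String) :
    (L.foldl (fun d k => d.insert (pvNorm k) k) PySem.Dict.empty).get? p
      = (L.filter (fun k => pvNorm k == p)).getLast? := by
  rw [pv_tab_get]; simp

lemma pv_tab_mem (L : List String) (p k : String)
    (h : (L.foldl (fun d x => d.insert (pvNorm x) x) PySem.Dict.empty).get? p = some k) :
    pvNorm k = p := by
  rw [pv_tab_get0] at h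
  have hm : k ∈ L.filter (fun x => pvNorm x == p) := List.mem_of_getLast? h
  simpa using (List.of_mem_filter hm)

-- pull_value_from_student_properties, characterized by one lookup in the normalization table
lemma pv_pull_eq (key : String) (d : PySem.Dict String String) :
    pull_value_from_student_properties key d =
      match (d.keys.foldl (fun t k => t.insert (pvNorm k) k) PySem.Dict.empty).get? (pvNorm key) with
      | none => ((none : Option String), d)
      | some k => (some (pvClean ((d.get? k).getD "")), d.erase k) := by
  simp only [pull_value_from_student_properties]
  have hnd : (((d.keys.foldl (fun t k => t.insert (pvNorm k) k) PySem.Dict.empty)).items.map Prod.fst).Nodup := by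
    have := PySem.Dict.nodup_keys_foldl_insert_key d.keys pvNorm (fun _ k => k) PySem.Dict.empty
      (by simp [PySem.Dict.keys_empty])
    simpa [PySem.Dict.keys] using this
  rw [pv_foldl_if_find _ _ hnd]
  cases hf : ((d.keys.foldl (fun t k => t.insert (pvNorm k) k) PySem.Dict.empty)).items.find?
      (fun p => p.1 == pvNorm key) with
  | none => simp [PySem.Dict.get?, hf]
  | some q => simp [PySem.Dict.get?, hf]

lemma pv_keys_erase (d : PySem.Dict String String) (k : String) :
    (d.erase k).keys = d.keys.filter (fun x => !(x == k)) := by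
  simp [PySem.Dict.erase, PySem.Dict.keys, List.filter_map, Function.comp_def]

-- deleting a key whose normalization is q does not change the table at p ≠ q
lemma pv_tab_erase (d : PySem.Dict String String) (k p : String) (hk : pvNorm k ≠ p) :
    ((d.erase k).keys.foldl (fun t x => t.insert (pvNorm x) x) PySem.Dict.empty).get? p
      = (d.keys.foldl (fun t x => t.insert (pvNorm x) x) PySem.Dict.empty).get? p := by
  rw [pv_tab_get0, pv_tab_get0, pv_keys_erase]
  congr 1
  rw [List.filter_filter]
  apply List.filter_congr
  intro x hx
  by_cases hxp : pvNorm x = p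
  · have hxk : x ≠ k := fun h => hk (h ▸ hxp)
    simp [hxp, hxk]
  · simp [beq_eq_false_iff_ne.mpr hxp]

-- the loop invariant: A's per-step rebuilt table agrees with B's build-once table on the remaining props
lemma pv_main (props : List String) (hself : ∀ p ∈ props, pvNorm p = p)
    (hnd : props.Nodup) (nrm : PySem.Dict String String)
    (v : String) (d : PySem.Dict String String)
    (hinv : ∀ p ∈ props, nrm.get? p
      = (d.keys.foldl (fun t k => t.insert (pvNorm k) k) PySem.Dict.empty).get? p) :
    props.foldl
      (fun (st : String × PySem.Dict String String) prop =>
        let r := pull_value_from_student_properties prop st.2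
        match r.1 with
        | some nv => if nv ≠ "" then (nv, r.2) else st
        | none => st) (v, d)
    = props.foldl
      (fun (st : String × PySem.Dict String String) prop =>
        match nrm.get? prop with
        | none => st
        | some orig =>
          let nv := pvClean ((st.2.get? orig).getD "")
          if nv ≠ "" then (nv, st.2.erase orig) else st) (v, d) := by
  induction props generalizing v d with
  | nil => rfl
  | cons q props ih =>
    simp only [List.foldl_cons]
    have hq : pvNorm q = q := hself q (List.mem_cons_self ..)
    have hpull := pv_pull_eq q d
    rw [hq] at hpull
    have hget : nrm.get? q
        = (d.keys.foldl (fun t k => t.insert (pvNorm k) k) PySem.Dict.empty).get? q :=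
      hinv q (List.mem_cons_self ..)
    cases hg : (d.keys.foldl (fun t k => t.insert (pvNorm k) k) PySem.Dict.empty).get? q with
    | none =>
      rw [hg] at hpull hget
      simp only [hpull, hget]
      exact ih (fun p hp => hself p (List.mem_cons_of_mem _ hp)) hnd.of_cons v d
        (fun p hp => hinv p (List.mem_cons_of_mem _ hp))
    | some k =>
      rw [hg] at hpull hget
      have hknorm : pvNorm k = q := by
        rw [← hq]; exact pv_tab_mem d.keys (pvNorm q) k (by rw [hq]; exact hg)
      simp only [hpull, hget]
      by_cases hnv : pvClean ((d.get? k).getD "") ≠ ""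
      · simp only [if_pos hnv]
        exact ih (fun p hp => hself p (List.mem_cons_of_mem _ hp)) hnd.of_cons _ _
          (fun p hp => by
            rw [hinv p (List.mem_cons_of_mem _ hp), pv_tab_erase d k p]
            rw [hknorm]
            exact fun h => (List.nodup_cons.mp hnd).1 (h ▸ hp))
      · simp only [if_neg hnv]
        exact ih (fun p hp => hself p (List.mem_cons_of_mem _ hp)) hnd.of_cons v d
          (fun p hp => hinv p (List.mem_cons_of_mem _ hp))

-- ===== VERDICT (by name: the statement is the Claim_ definition above) =====
theorem update_course_and_student_properties_spec : Claim_equal_update_course_and_student_properties := by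
  unfold Claim_equal_update_course_and_student_properties
  intro course sp _
  unfold Spec_update_course_and_student_properties
  simp only [update_course_and_student_properties, update_course_and_student_properties_alt]
  rw [pv_main pvProps (by decide) (by decide) _ course (PySem.Dict.ofList sp)
    (fun p _ => rfl)]
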